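-- pv_equiv track=rewrite | github.com/EricMencarini/python_practices_datalemur | 02.medium/Video_Ads_Insertion.py | can_insert_ads
-- ===== SOURCE A (Python) =====
-- def can_insert_ads(feed_items, n):
--     new_ads = 0
--     consecutive_z = 0
--
--     if feed_items[0] == 0:
--       new_ads += 1
--
--     for i in range(len(feed_items)):
--       if feed_items[i] != 0:
--         if consecutive_z > 1:
--           new_ads += (consecutive_z - 1)
--         if new_ads >= n:
--           return True
--         consecutive_z = 0
--       else:
--         consecutive_z += 1
--
--     if feed_items[-1] == 0:
--       new_ads += 1
--
--     if consecutive_z > 1: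
--       new_ads += (consecutive_z-1)
--
--     if new_ads >= n:
--       return True
--     else:
--       return False
-- ===== SOURCE B (Python) =====
-- def can_insert_ads(feed_items, n):
--     pairs = sum(1 for a, b in zip(feed_items, feed_items[1:]) if a == 0 and b == 0)
--     ends = (feed_items[0] == 0) + (feed_items[-1] == 0)
--     return ends + pairs >= n
-- ===== Notes on version B (the rewrite author's own statement) =====
-- stated objective: simpler
-- what changed: Replaces the running (new_ads, consecutive_z) state machine with early return by a stateless count: adjacent zero pairs (zip with the shifted list) plus end-of-feed zeros, compared to n once.
import Mathlib
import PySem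

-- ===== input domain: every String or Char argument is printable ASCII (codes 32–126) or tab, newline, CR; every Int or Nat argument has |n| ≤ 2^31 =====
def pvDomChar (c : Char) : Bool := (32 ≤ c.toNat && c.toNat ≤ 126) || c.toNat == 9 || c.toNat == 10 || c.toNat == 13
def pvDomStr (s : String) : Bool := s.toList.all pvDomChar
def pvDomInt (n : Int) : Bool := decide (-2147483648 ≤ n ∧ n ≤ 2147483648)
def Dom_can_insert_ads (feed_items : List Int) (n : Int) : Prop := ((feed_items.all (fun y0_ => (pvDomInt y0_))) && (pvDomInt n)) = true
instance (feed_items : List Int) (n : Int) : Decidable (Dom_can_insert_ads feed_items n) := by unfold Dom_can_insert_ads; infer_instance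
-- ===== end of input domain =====

-- B replaces A's running (new_ads, consecutive_z) state machine (with in-loop early return)
-- by a stateless count — adjacent zero pairs plus end-of-feed zeros — compared to n once; equal return values on every non-empty feed.


-- ===== PORT A =====
-- the 'for i in range(len(feed_items))' loop, reading feed_items[i] in order = recursion over the list;
-- 'none' encodes the in-loop 'return True', 'some (new_ads, consecutive_z)' the state after the loop
def canInsertLoop : List Int → Int → Int → Int → Option (Int × Int)
  | [], new_ads, consecutive_z, _ => some (new_ads, consecutive_z)
  | x :: xs, new_ads, consecutive_z, n =>
    if x ≠ 0 then
      let na := if consecutive_z > 1 then new_ads + (consecutive_z - 1) else new_ads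
      if na ≥ n then none else canInsertLoop xs na 0 n
    else canInsertLoop xs new_ads (consecutive_z + 1) n

def can_insert_ads (feed_items : List Int) (n : Int) : Bool :=
  match PySem.List.pyGet? feed_items 0 with
  | none => false  -- feed_items[0] raises IndexError on the empty feed (outside Pre_)
  | some h0 =>
    let new_ads : Int := if h0 = 0 then 1 else 0
    match canInsertLoop feed_items new_ads 0 n with
    | none => true
    | some (na, cz) =>
      match PySem.List.pyGet? feed_items (-1) with
      | none => false
      | some l =>
        let na1 := if l = 0 then na + 1 else na
        let na2 := if cz > 1 then na1 + (cz - 1) else na1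
        decide (na2 ≥ n)

-- ===== PORT B =====
def can_insert_ads_alt (feed_items : List Int) (n : Int) : Bool :=
  -- sum(1 for a, b in zip(feed_items, feed_items[1:]) if a == 0 and b == 0)
  let pairs : Int :=
    (feed_items.zip (PySem.List.slice feed_items (some 1) none)).foldl
      (fun acc p => if p.1 = 0 ∧ p.2 = 0 then acc + 1 else acc) 0
  match PySem.List.pyGet? feed_items 0, PySem.List.pyGet? feed_items (-1) with
  | some h, some l =>
    decide ((if h = 0 then (1 : Int) else 0) + (if l = 0 then (1 : Int) else 0) + pairs ≥ n)
  | _, _ => false  -- feed_items[0] raises IndexError on the empty feed (outside Pre_)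

-- ===== PRECONDITION & SPEC =====
-- Pre_ excludes only the empty feed, on which both A and B raise IndexError (feed_items[0]).
def Pre_can_insert_ads (feed_items : List Int) (n : Int) : Prop := feed_items ≠ []
instance (feed_items : List Int) (n : Int) : Decidable (Pre_can_insert_ads feed_items n) := by unfold Pre_can_insert_ads; infer_instance
def pvWitness_can_insert_ads : List Int × Int := ([0, 0, 1, 0], 2)

def Spec_can_insert_ads (feed_items : List Int) (n : Int) (out : Bool) : Prop := out = can_insert_ads_alt feed_items n
instance (feed_items : List Int) (n : Int) (out : Bool) : Decidable (Spec_can_insert_ads feed_items n out) := by unfold Spec_can_insert_ads; infer_instance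

-- ===== CLAIM (what is proved, stated in full; the proofs are below) =====
def Claim_equal_can_insert_ads : Prop := ∀ (feed_items : List Int) (n : Int), Dom_can_insert_ads feed_items n → Pre_can_insert_ads feed_items n → Spec_can_insert_ads feed_items n (can_insert_ads feed_items n)

-- ===== LEMMAS AND PROOFS =====

-- A's 'if consecutive_z > 1: new_ads += consecutive_z - 1' as a function
def pvPay (cz : Int) : Int := if cz > 1 then cz - 1 else 0

-- the loop's final state, ignoring the early return
def pvFin : List Int → Int → Int → Int × Int
  | [], na, cz => (na, cz)
  | x :: xs, na, cz =>
    if x ≠ 0 then pvFin xs (if cz > 1 then na + (cz - 1) else na) 0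
    else pvFin xs na (cz + 1)

-- count of zeros whose predecessor is a zero, given the entering zero-run length cz
def pvAdj : List Int → Int → Int
  | [], _ => 0
  | x :: xs, cz => if x = 0 then (if 1 ≤ cz then 1 else 0) + pvAdj xs (cz + 1) else pvAdj xs 0

theorem pvPay_nonneg (cz : Int) : 0 ≤ pvPay cz := by
  unfold pvPay; split_ifs <;> omega

theorem pvFin_mono : ∀ (xs : List Int) (na cz : Int), na ≤ (pvFin xs na cz).1 := by
  intro xs
  induction xs with
  | nil => intro na cz; simp [pvFin]
  | cons x xs ih =>
    intro na cz
    simp only [pvFin]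
    split_ifs with hx hcz
    · have := ih (na + (cz - 1)) 0
      omega
    · exact ih na 0
    · exact ih na (cz + 1)

theorem pvLoop_none : ∀ (xs : List Int) (na cz n : Int),
    canInsertLoop xs na cz n = none → n ≤ (pvFin xs na cz).1 := by
  intro xs
  induction xs with
  | nil => intro na cz n h; simp [canInsertLoop] at h
  | cons x xs ih =>
    intro na cz n h
    simp only [canInsertLoop] at h
    simp only [pvFin]
    generalize hna' : (if cz > 1 then na + (cz - 1) else na) = na' at h ⊢
    split_ifs at h ⊢ with hx hge
    · have := pvFin_mono xs na' 0
      omega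
    · exact ih _ _ _ h
    · exact ih _ _ _ h

theorem pvLoop_some : ∀ (xs : List Int) (na cz n : Int) (p : Int × Int),
    canInsertLoop xs na cz n = some p → p = pvFin xs na cz := by
  intro xs
  induction xs with
  | nil => intro na cz n p h; simp [canInsertLoop] at h; simp [pvFin, h]
  | cons x xs ih =>
    intro na cz n p h
    simp only [canInsertLoop] at h
    simp only [pvFin]
    generalize hna' : (if cz > 1 then na + (cz - 1) else na) = na' at h ⊢
    split_ifs at h ⊢ with hx hge
    all_goals first
      | exact Option.noConfusion h
      | exact ih _ _ _ _ h

theorem pvFin_formula : ∀ (xs : List Int) (na cz : Int), 0 ≤ cz →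
    (pvFin xs na cz).1 + pvPay (pvFin xs na cz).2 = na + pvPay cz + pvAdj xs cz := by
  intro xs
  induction xs with
  | nil => intro na cz _; simp [pvFin, pvAdj]
  | cons x xs ih =>
    intro na cz hcz
    by_cases hx : x = 0
    · rw [show pvFin (x :: xs) na cz = pvFin xs na (cz + 1) by simp [pvFin, hx]]
      rw [show pvAdj (x :: xs) cz = (if 1 ≤ cz then 1 else 0) + pvAdj xs (cz + 1) by
        simp only [pvAdj, if_pos hx]]
      rw [ih na (cz + 1) (by omega)]
      have hstep : pvPay (cz + 1) = pvPay cz + (if 1 ≤ cz then 1 else 0) := by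
        unfold pvPay; split_ifs <;> omega
      omega
    · rw [show pvFin (x :: xs) na cz = pvFin xs (if cz > 1 then na + (cz - 1) else na) 0 by
        simp [pvFin, hx]]
      rw [show pvAdj (x :: xs) cz = pvAdj xs 0 by simp only [pvAdj, if_neg hx]]
      rw [ih _ 0 le_rfl]
      have h0 : pvPay 0 = 0 := by unfold pvPay; norm_num
      have harg : (if cz > 1 then na + (cz - 1) else na) = na + pvPay cz := by
        unfold pvPay; split_ifs <;> omega
      omega

theorem pvAdj_pairs : ∀ (xs : List Int) (cz : Int), 0 ≤ cz →
    pvAdj xs cz = ((xs.zip xs.tail).countP (fun p => decide (p.1 = 0 ∧ p.2 = 0)) : Int)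
      + (if 1 ≤ cz ∧ xs.head? = some 0 then 1 else 0) := by
  intro xs
  induction xs with
  | nil => intro cz _; simp [pvAdj]
  | cons x xs ih =>
    intro cz hcz
    cases xs with
    | nil =>
      simp only [pvAdj, List.tail_cons, List.zip_nil_right, List.countP_nil, List.head?_cons,
        Option.some.injEq, Nat.cast_zero, zero_add]
      split_ifs <;> omega
    | cons y ys =>
      have ih1 := ih (cz + 1) (by omega)
      have ih2 := ih 0 le_rfl
      simp only [pvAdj, List.tail_cons, List.zip_cons_cons, List.countP_cons, List.head?_cons,
        Option.some.injEq, decide_eq_true_eq, zero_add] at ih1 ih2 ⊢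
      push_cast at ih1 ih2 ⊢
      split_ifs at ih1 ih2 ⊢ <;> first | omega | simp_all

-- B's pair count equals countP over the zip with the tail
theorem pvPairs_eq (feed : List Int) :
    (feed.zip (PySem.List.slice feed (some 1) none)).foldl
      (fun acc p => if p.1 = 0 ∧ p.2 = 0 then acc + 1 else acc) 0
    = ((feed.zip feed.tail).countP (fun p => decide (p.1 = 0 ∧ p.2 = 0)) : Int) := by
  rw [PySem.List.slice_from_one, PySem.List.foldl_ite_add_one]
  simp

-- ===== VERDICT (by name: the statement is the Claim_ definition above) =====
theorem can_insert_ads_spec : Claim_equal_can_insert_ads := by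
  intro feed n _ hpre
  unfold Spec_can_insert_ads
  match feed with
  | [] => exact absurd rfl hpre
  | h :: t =>
    have hget0 : PySem.List.pyGet? (h :: t) 0 = some h := PySem.List.pyGet?_zero_cons h t
    obtain ⟨l, hlast⟩ : ∃ l, (h :: t).getLast? = some l := by
      cases e : (h :: t).getLast? with
      | none => simp at e
      | some l => exact ⟨l, rfl⟩
    have hgetm1 : PySem.List.pyGet? (h :: t) (-1) = some l := by
      rw [PySem.List.pyGet?_neg_one, hlast]
    set na0 : Int := if h = 0 then 1 else 0 with hna0
    have hB : can_insert_ads_alt (h :: t) n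
        = decide (na0 + (if l = 0 then (1:Int) else 0)
            + (((h :: t).zip (h :: t).tail).countP (fun p => decide (p.1 = 0 ∧ p.2 = 0)) : Int) ≥ n) := by
      unfold can_insert_ads_alt
      rw [pvPairs_eq, hget0, hgetm1]
    have hfin := pvFin_formula (h :: t) na0 0 le_rfl
    have hadj := pvAdj_pairs (h :: t) 0 le_rfl
    rw [show pvPay 0 = 0 by unfold pvPay; norm_num, add_zero] at hfin
    rw [show (if 1 ≤ (0:Int) ∧ (h :: t).head? = some 0 then (1:Int) else 0) = 0 by
      rw [if_neg]; rintro ⟨h1, -⟩; omega, add_zero] at hadj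
    rw [hadj] at hfin
    unfold can_insert_ads
    simp only [hget0]
    rw [← hna0]
    cases hloop : canInsertLoop (h :: t) na0 0 n with
    | none =>
      have hle := pvLoop_none (h :: t) na0 0 n hloop
      have hp := pvPay_nonneg (pvFin (h :: t) na0 0).2
      rw [hB]
      symm
      rw [decide_eq_true_eq]
      split_ifs <;> omega
    | some p =>
      obtain ⟨na, cz⟩ := p
      have hps := pvLoop_some (h :: t) na0 0 n (na, cz) hloop
      have h1 : na = (pvFin (h :: t) na0 0).1 := congrArg Prod.fst hps
      have h2 : cz = (pvFin (h :: t) na0 0).2 := congrArg Prod.snd hps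
      simp only [hgetm1]
      rw [hB, decide_eq_decide, h1, h2]
      unfold pvPay at hfin
      split_ifs at hfin ⊢ <;> omega
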